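-- pv_equiv track=rewrite | github.com/oftenliu/often-personattr | datafolder/reid_dataset/import_rap2.py | proc_attr
-- ===== SOURCE A (Python) =====
-- def proc_attr(attrlist,combine_attachment_flag = False):
--     attrlist_comebine = []
--     if combine_attachment_flag:
--         for idx in range(0,len(attrlist)):
--             if idx == 88: #and idx < 98:
--                 if attrlist[88] ==1 or attrlist[89] ==1 or attrlist[91] ==1:#Backpack  ShoulderBag   WaistBag ->  bag
--                     attrlist_comebine.append(1)
--                 else:
--                      attrlist_comebine.append(0)
--
--                 if attrlist[90] ==1 or attrlist[93] ==1 or attrlist[94] ==1: #HandBag PlasticBag PaperBag -> 拎东西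
--                     attrlist_comebine.append(1)
--                 else:
--                     attrlist_comebine.append(0)
--                 attrlist_comebine.append(attrlist[92])         #Box
--                 attrlist_comebine.append(attrlist[95])         #HandTrunk
--                 attrlist_comebine.append(attrlist[96])         #Baby
--                 #舍弃attachment-Other
--                 #attrlist_comebine.append(attrlist[97])        #Other
--             elif idx > 88 and idx < 98:
--                 continue
--             else:
--                 attrlist_comebine.append(attrlist[idx])
--         return attrlist_comebine
--     else:
--         return attrlist
-- ===== SOURCE B (Python) =====
-- def proc_attr(attrlist, combine_attachment_flag=False):
--     if not combine_attachment_flag: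
--         return attrlist
--     out = list(attrlist)
--     if len(out) > 88:
--         a88, a89, a90, a91, a92, a93, a94, a95, a96 = attrlist[88:97]
--         out[88:98] = [int(1 in (a88, a89, a91)), int(1 in (a90, a93, a94)), a92, a95, a96]
--     return out
-- ===== Notes on version B (the rewrite author's own statement) =====
-- stated objective: simpler
-- what changed: Replaces A's per-index append loop with its idx==88 special case and continue-skip by copy-then-splice: copy the list, unpack the nine source attributes from one slice, and overwrite positions 88:98 with the 5-element combined block via slice assignment.
import Mathlib
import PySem

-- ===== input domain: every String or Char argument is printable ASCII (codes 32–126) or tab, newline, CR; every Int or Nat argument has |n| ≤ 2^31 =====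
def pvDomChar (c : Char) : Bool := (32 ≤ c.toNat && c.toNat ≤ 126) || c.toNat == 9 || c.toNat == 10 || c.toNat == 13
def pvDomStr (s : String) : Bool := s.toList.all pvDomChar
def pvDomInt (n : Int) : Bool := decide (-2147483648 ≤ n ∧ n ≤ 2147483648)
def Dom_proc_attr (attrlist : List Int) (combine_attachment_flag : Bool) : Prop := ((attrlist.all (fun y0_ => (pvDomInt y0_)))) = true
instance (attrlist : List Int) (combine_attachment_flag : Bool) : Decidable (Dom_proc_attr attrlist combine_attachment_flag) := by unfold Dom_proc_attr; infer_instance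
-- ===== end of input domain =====

-- B replaces A's per-index append loop (idx==88 special case, continue-skip) by
-- copy-then-splice: unpack the nine source attributes from one slice and overwrite
-- positions 88:98 with the combined block — a simpler decomposition, same cost.


-- ===== PORT A =====
-- A's loop over range(len(attrlist)): at idx 88 emit the combined 5-element block,
-- skip 89..97 via continue, otherwise append attrlist[idx].
def proc_attr (attrlist : List Int) (combine_attachment_flag : Bool) : List Int :=
  if combine_attachment_flag then
    (PySem.List.pyRange 0 attrlist.length 1).foldl (fun acc idx =>
      if idx == 88 then
        let acc := acc ++ [if PySem.List.pyGetD attrlist 88 0 == 1 || PySem.List.pyGetD attrlist 89 0 == 1 || PySem.List.pyGetD attrlist 91 0 == 1 then (1 : Int) else 0]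
        let acc := acc ++ [if PySem.List.pyGetD attrlist 90 0 == 1 || PySem.List.pyGetD attrlist 93 0 == 1 || PySem.List.pyGetD attrlist 94 0 == 1 then (1 : Int) else 0]
        acc ++ [PySem.List.pyGetD attrlist 92 0, PySem.List.pyGetD attrlist 95 0, PySem.List.pyGetD attrlist 96 0]
      else if 88 < idx && idx < 98 then acc
      else acc ++ [PySem.List.pyGetD attrlist idx 0]) []
  else attrlist

-- ===== PORT B =====
-- Source B: copy the list; if longer than 88, unpack attrlist[88:97] into nine names and
-- splice the 5-element combined block into out[88:98].  Python's slice assignment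
-- out[88:98] = block is ported as take 88 ++ block ++ drop 98 (exact for these
-- nonnegative in-range bounds); the tuple-unpack ValueError (fewer than 9 elements)
-- corresponds to the wildcard match arm, which is outside Pre_.
def proc_attr_alt (attrlist : List Int) (combine_attachment_flag : Bool) : List Int :=
  if !combine_attachment_flag then attrlist
  else
    let out := attrlist
    if 88 < out.length then
      match PySem.List.slice attrlist (some 88) (some 97) with
      | [a88, a89, a90, a91, a92, a93, a94, a95, a96] =>
          out.take 88 ++
            [if (1 : Int) ∈ [a88, a89, a91] then (1 : Int) else 0,
             if (1 : Int) ∈ [a90, a93, a94] then (1 : Int) else 0,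
             a92, a95, a96] ++ out.drop 98
      | _ => attrlist
    else out

-- ===== PRECONDITION & SPEC =====
-- Pre_ excludes exactly the inputs on which A raises IndexError: with the flag set
-- and a length between 89 and 96, the idx==88 branch reads indices past the end of
-- the list.  (B raises there too, as a tuple-unpack ValueError.)
def Pre_proc_attr (attrlist : List Int) (combine_attachment_flag : Bool) : Prop :=
  combine_attachment_flag = true → (attrlist.length ≤ 88 ∨ 97 ≤ attrlist.length)
instance (attrlist : List Int) (combine_attachment_flag : Bool) : Decidable (Pre_proc_attr attrlist combine_attachment_flag) := by unfold Pre_proc_attr; infer_instance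
def pvWitness_proc_attr : List Int × Bool := ([1, 0, 1], true)

def Spec_proc_attr (attrlist : List Int) (combine_attachment_flag : Bool) (out : List Int) : Prop := out = proc_attr_alt attrlist combine_attachment_flag
instance (attrlist : List Int) (combine_attachment_flag : Bool) (out : List Int) : Decidable (Spec_proc_attr attrlist combine_attachment_flag out) := by unfold Spec_proc_attr; infer_instance

-- ===== CLAIM (what is proved, stated in full; the proofs are below) =====
def Claim_equal_proc_attr : Prop := ∀ (attrlist : List Int) (combine_attachment_flag : Bool), Dom_proc_attr attrlist combine_attachment_flag → Pre_proc_attr attrlist combine_attachment_flag → Spec_proc_attr attrlist combine_attachment_flag (proc_attr attrlist combine_attachment_flag)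

-- ===== LEMMAS AND PROOFS =====
-- prefix: for k ≤ len, mapping pyGetD over range 0 k is take k
lemma map_g_prefix (xs : List Int) (k : Nat) (hk : k ≤ xs.length) :
    (PySem.List.pyRange 0 (k : Int) 1).map (fun j => PySem.List.pyGetD xs j 0) = xs.take k := by
  have hlen : ((xs.take k).length : Int) = (k : Int) := by simp [Nat.min_eq_left hk]
  conv_rhs => rw [← PySem.List.map_pyGetD_pyRange_zero' (xs.take k) 0]
  rw [hlen]
  apply List.map_congr_left
  intro j hj
  rw [PySem.List.mem_pyRange_one] at hj
  rw [PySem.List.pyGetD_eq_getElem _ _ hj.1 (by omega),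
      PySem.List.pyGetD_eq_getElem _ _ hj.1 (by rw [hlen]; omega)]
  rw [List.getElem_take]

-- a list with at least nine elements splits into nine heads and a tail
lemma pv_exists_nine (w : List Int) (h : 9 ≤ w.length) :
    ∃ a0 a1 a2 a3 a4 a5 a6 a7 a8 rest,
      w = a0 :: a1 :: a2 :: a3 :: a4 :: a5 :: a6 :: a7 :: a8 :: rest := by
  rcases w with _ | ⟨a0, w⟩; · simp at h
  rcases w with _ | ⟨a1, w⟩; · simp at h
  rcases w with _ | ⟨a2, w⟩; · simp at h
  rcases w with _ | ⟨a3, w⟩; · simp at h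
  rcases w with _ | ⟨a4, w⟩; · simp at h
  rcases w with _ | ⟨a5, w⟩; · simp at h
  rcases w with _ | ⟨a6, w⟩; · simp at h
  rcases w with _ | ⟨a7, w⟩; · simp at h
  rcases w with _ | ⟨a8, rest⟩; · simp at h
  exact ⟨a0, a1, a2, a3, a4, a5, a6, a7, a8, rest, rfl⟩

-- ===== VERDICT (by name: the statement is the Claim_ definition above) =====
theorem proc_attr_spec : Claim_equal_proc_attr := by
  intro xs c _ hpre
  unfold Spec_proc_attr
  unfold Pre_proc_attr at hpre
  cases c with
  | false => simp [proc_attr, proc_attr_alt]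
  | true =>
    rcases hpre rfl with h88 | h97
    · -- short list: A's loop is a plain copy, B returns the copy unchanged
      simp only [proc_attr, proc_attr_alt, Bool.not_true, Bool.false_eq_true,
        if_false, if_true, if_neg (by omega : ¬ 88 < xs.length)]
      rw [PySem.List.foldl_congr_mem _ _ (fun acc idx => acc ++ [PySem.List.pyGetD xs idx 0])]
      · rw [PySem.List.foldl_append_singleton_eq_map, PySem.List.map_pyGetD_pyRange_zero' xs 0]
        simp
      · intro acc idx hidx
        rw [PySem.List.mem_pyRange_one] at hidx
        have h1 : (idx == 88) = false := by simp; omega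
        have h2 : (88 < idx && idx < 98) = false := by simp; omega
        simp [h1, h2]
    · -- long list
      obtain ⟨a0, a1, a2, a3, a4, a5, a6, a7, a8, rest, hd⟩ :=
        pv_exists_nine (xs.drop 88) (by simp; omega)
      have hsl : PySem.List.slice xs (some 88) (some 97)
          = [a0, a1, a2, a3, a4, a5, a6, a7, a8] := by
        rw [PySem.List.slice_toNat xs (by norm_num) (by norm_num),
            show Int.toNat 88 = 88 from rfl, show Int.toNat 97 = 97 from rfl,
            show 97 - 88 = 9 from rfl, hd]
        rfl
      -- each source read attrlist[88+j] is the j-th unpacked name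
      have egen : ∀ (n : Nat), 88 ≤ n → n ≤ 96 →
          PySem.List.pyGetD xs (n : Int) 0
            = [a0, a1, a2, a3, a4, a5, a6, a7, a8].getD (n - 88) 0 := by
        intro n hlo hhi
        rw [PySem.List.pyGetD_natCast]
        have h1 : xs.getD n 0 = (xs.drop 88).getD (n - 88) 0 := by
          simp only [List.getD]
          rw [List.getElem?_drop, Nat.add_sub_cancel' hlo]
        rw [h1, hd]
        interval_cases n <;> rfl
      have e88 := egen 88 (by omega) (by omega)
      have e89 := egen 89 (by omega) (by omega)
      have e90 := egen 90 (by omega) (by omega)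
      have e91 := egen 91 (by omega) (by omega)
      have e92 := egen 92 (by omega) (by omega)
      have e93 := egen 93 (by omega) (by omega)
      have e94 := egen 94 (by omega) (by omega)
      have e95 := egen 95 (by omega) (by omega)
      have e96 := egen 96 (by omega) (by omega)
      norm_num at e88 e89 e90 e91 e92 e93 e94 e95 e96
      have hlen : (88 : Int) ≤ (xs.length : Int) := by exact_mod_cast by omega
      simp only [proc_attr, proc_attr_alt, Bool.not_true, Bool.false_eq_true,
        if_false, if_true, if_pos (by omega : 88 < xs.length), hsl]
      rw [PySem.List.pyRange_one_append 0 88 (xs.length : Int) (by omega) hlen,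
          PySem.List.pyRange_one_append 88 89 (xs.length : Int) (by omega) (by omega),
          PySem.List.pyRange_one_cons (by omega : (88:Int) < 89),
          show (88:Int) + 1 = 89 from by norm_num,
          PySem.List.pyRange_one_eq_nil (by omega : (89:Int) ≤ 89)]
      rw [List.foldl_append, List.foldl_append]
      -- outermost fold: indices 89..len-1, keep only those ≥ 98
      rw [PySem.List.foldl_congr_mem _ _
        (fun acc idx => if decide (98 ≤ idx) = true then acc ++ [PySem.List.pyGetD xs idx 0] else acc)
        _ (by
          intro acc idx hidx
          rw [PySem.List.mem_pyRange_one] at hidx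
          have h1 : (idx == 88) = false := by simp; omega
          by_cases h : (98:Int) ≤ idx
          · have h2 : (decide (88 < idx) && decide (idx < 98)) = false := by simp; omega
            simp [h1, h2, h]
          · have h2 : (decide (88 < idx) && decide (idx < 98)) = true := by simp; omega
            simp [h1, h2, h])]
      rw [PySem.List.foldl_append_if]
      -- the idx = 88 step
      simp only [List.foldl_cons, List.foldl_nil, beq_self_eq_true, if_true]
      -- indices 0..87 copy
      rw [PySem.List.foldl_congr_mem _ _ (fun acc idx => acc ++ [PySem.List.pyGetD xs idx 0])
        _ (by
          intro acc idx hidx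
          rw [PySem.List.mem_pyRange_one] at hidx
          have h1 : (idx == 88) = false := by simp; omega
          have h2 : (decide (88 < idx) && decide (idx < 98)) = false := by simp; omega
          simp [h1, h2])]
      rw [PySem.List.foldl_append_singleton_eq_map]
      have hpref := map_g_prefix xs 88 (by omega)
      norm_num at hpref
      rw [hpref]
      have hfilt : (PySem.List.pyRange 89 (xs.length : Int) 1).filter (fun idx => decide (98 ≤ idx))
          = PySem.List.pyRange 98 (xs.length : Int) 1 := by
        by_cases h98 : (98 : Int) ≤ (xs.length : Int)
        · rw [PySem.List.pyRange_one_append 89 98 _ (by omega) h98, List.filter_append]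
          rw [List.filter_eq_nil_iff.mpr (by
            intro a ha; rw [PySem.List.mem_pyRange_one] at ha; simp; omega)]
          rw [List.filter_eq_self.mpr (by
            intro a ha; rw [PySem.List.mem_pyRange_one] at ha; simp; omega)]
          simp
        · rw [PySem.List.pyRange_one_eq_nil (by omega : (xs.length : Int) ≤ 98)]
          apply List.filter_eq_nil_iff.mpr
          intro a ha; rw [PySem.List.mem_pyRange_one] at ha; simp; omega
      rw [hfilt]
      have hdrop : (PySem.List.pyRange 98 (xs.length : Int) 1).map (fun j => PySem.List.pyGetD xs j 0)
          = xs.drop 98 := by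
        have := PySem.List.map_pyGetD_pyRange xs 0 (a := 98) (by omega)
        simpa [PySem.List.len] using this
      rw [hdrop, e88, e89, e90, e91, e92, e93, e94, e95, e96]
      have hb : ∀ x y z : Int,
          ((x == 1 || y == 1 || z == 1) = true) ↔ ((1 : Int) ∈ [x, y, z]) := by
        intro x y z
        simp only [Bool.or_eq_true, beq_iff_eq, List.mem_cons, List.not_mem_nil, or_false]
        omega
      rw [if_congr (hb a0 a1 a3) rfl rfl, if_congr (hb a2 a5 a6) rfl rfl]
      simp
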